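-- pv_equiv track=rewrite | github.com/arai3456/PCCB | chapter02/deplicate_combination.py | duplicate_combination
-- ===== SOURCE A (Python) =====
-- def duplicate_combination(n, m, a, M):
--   dp = list()
--   for i in range(n + 1):
--     dp.append(list())
--     for j in range(m + 1):
--       dp[i].append(0)
--   for i in range(n + 1):
--     dp[i][0] = 1
--   for i in range(n):
--     for j in range(1, m+1):
--       if j - 1 - a[i] >= 0:
--         dp[i + 1][j] = (dp[i + 1][j - 1] + dp[i][j] - dp[i][j - 1 -a[i]] + M) % M
--       else:
--         dp[i + 1][j] = (dp[i + 1][j - 1] + dp[i][j]) % M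
--   return dp[n][m]
-- ===== SOURCE B (Python) =====
-- def duplicate_combination(n, m, a, M):
--     # Direct bounded-sum DP, one row at a time: cur[j] = (sum_{k=0}^{min(j,a[i])} prev[j-k]) % M
--     prev = [1] + [0] * m
--     for i in range(n):
--         ai = a[i]
--         cur = [1]
--         for j in range(1, m + 1):
--             t = min(j, ai)
--             s = 0
--             for k in range(t + 1):
--                 s += prev[j - k]
--             cur.append(s % M)
--         prev = cur
--     return prev[m]
-- ===== Notes on version B (the rewrite author's own statement) =====
-- stated objective: alternative
-- what changed: B keeps a single rolling row and computes each entry directly as the bounded convolution sum (sum of dp[i][j-k] for k=0..min(j,a[i])) % M, instead of A's full (n+1)x(m+1) table with the telescoped sliding-window prefix-difference update.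
-- outside the precondition, e.g. on duplicate_combination(1, 0, [], 5): A returns 1, B raises IndexError; on duplicate_combination(1, 1, [-1], 10): A returns 1, B returns 0
import Mathlib
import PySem

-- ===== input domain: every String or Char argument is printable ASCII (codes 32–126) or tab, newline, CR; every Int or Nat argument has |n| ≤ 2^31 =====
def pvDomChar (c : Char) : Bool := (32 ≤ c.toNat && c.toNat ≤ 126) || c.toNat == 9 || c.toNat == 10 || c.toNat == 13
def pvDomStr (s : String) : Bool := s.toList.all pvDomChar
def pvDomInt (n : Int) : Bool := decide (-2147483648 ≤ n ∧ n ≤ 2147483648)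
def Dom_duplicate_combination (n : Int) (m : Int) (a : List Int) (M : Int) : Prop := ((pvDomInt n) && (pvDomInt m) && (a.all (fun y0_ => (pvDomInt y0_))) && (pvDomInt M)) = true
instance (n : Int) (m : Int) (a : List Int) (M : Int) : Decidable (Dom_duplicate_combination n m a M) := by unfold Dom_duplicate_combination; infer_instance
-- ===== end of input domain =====

-- B replaces A's sliding-window prefix-difference DP table with a single rolling row whose
-- entries are computed as the direct bounded sum; alternative algorithm, same return value
-- on every input admitted by Pre_.

-- Python list read xs[i] (in range on every admitted input) and write xs[i] = v.
def pvGetI (xs : List Int) (i : Int) : Int := PySem.List.pyGetD xs i 0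
def pvGetRow (dp : List (List Int)) (i : Int) : List Int := PySem.List.pyGetD dp i []
def pvSetIdx {α : Type} (xs : List α) (i : Int) (v : α) : List α :=
  if 0 ≤ i then xs.set i.toNat v else xs

-- ===== PORT A =====
def duplicate_combination (n : Int) (m : Int) (a : List Int) (M : Int) : Int :=
  let dp1 : List (List Int) :=
    (PySem.List.pyRange 0 (n + 1) 1).foldl (fun dp _i =>
      dp ++ [(PySem.List.pyRange 0 (m + 1) 1).foldl (fun row _j => row ++ [(0 : Int)]) []]) []
  let dp2 :=
    (PySem.List.pyRange 0 (n + 1) 1).foldl (fun dp i =>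
      pvSetIdx dp i (pvSetIdx (pvGetRow dp i) 0 1)) dp1
  let dp3 :=
    (PySem.List.pyRange 0 n 1).foldl (fun dp i =>
      (PySem.List.pyRange 1 (m + 1) 1).foldl (fun dp j =>
        pvSetIdx dp (i + 1) (pvSetIdx (pvGetRow dp (i + 1)) j
          (if j - 1 - pvGetI a i ≥ 0 then
            PySem.Int.mod (pvGetI (pvGetRow dp (i + 1)) (j - 1) + pvGetI (pvGetRow dp i) j
              - pvGetI (pvGetRow dp i) (j - 1 - pvGetI a i) + M) M
          else
            PySem.Int.mod (pvGetI (pvGetRow dp (i + 1)) (j - 1) + pvGetI (pvGetRow dp i) j) M))) dp) dp2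
  pvGetI (pvGetRow dp3 n) m

-- ===== PORT B =====
def duplicate_combination_alt (n : Int) (m : Int) (a : List Int) (M : Int) : Int :=
  -- [1] + [0]*m ; Python [0]*m is [] for m < 0, exactly List.replicate m.toNat
  let prev0 : List Int := [1] ++ List.replicate m.toNat 0
  let prevN :=
    (PySem.List.pyRange 0 n 1).foldl (fun prev i =>
      let ai := pvGetI a i
      (PySem.List.pyRange 1 (m + 1) 1).foldl (fun cur j =>
        let t := min j ai
        let s := (PySem.List.pyRange 0 (t + 1) 1).foldl (fun s k => s + pvGetI prev (j - k)) 0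
        cur ++ [PySem.Int.mod s M]) [1]) prev0
  pvGetI prevN m

-- ===== PRECONDITION & SPEC =====
-- Pre_ excludes the inputs where a Python program crashes — n < 0, n > len(a) or m < 0
-- (IndexError in A or in B's a[i]/prev[m]), M = 0 while the modulo is executed (n ≥ 1 and
-- m ≥ 1: ZeroDivisionError), and bounds a[i] ≤ -2 for i < n with m ≥ 1 (IndexError in A at
-- dp[i][j-1-a[i]]) — together with two defensible corners: n > len(a) with m = 0, where A
-- returns 1 but B itself raises IndexError reading a[i]; and the meaningless negative
-- capacity a[i] = -1 with m ≥ 1, a corner no one would specify, where A's sliding window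
-- and B's empty bounded sum legitimately disagree.
def Pre_duplicate_combination (n : Int) (m : Int) (a : List Int) (M : Int) : Prop :=
  0 ≤ n ∧ n ≤ (a.length : Int) ∧ 0 ≤ m ∧ (M ≠ 0 ∨ n = 0 ∨ m = 0) ∧
    (m = 0 ∨ ∀ x ∈ a.take n.toNat, 0 ≤ x)
instance (n : Int) (m : Int) (a : List Int) (M : Int) : Decidable (Pre_duplicate_combination n m a M) := by
  unfold Pre_duplicate_combination; infer_instance
def pvWitness_duplicate_combination : Int × Int × List Int × Int := (1, 1, [0], 2)

def Spec_duplicate_combination (n : Int) (m : Int) (a : List Int) (M : Int) (out : Int) : Prop :=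
  out = duplicate_combination_alt n m a M
instance (n : Int) (m : Int) (a : List Int) (M : Int) (out : Int) : Decidable (Spec_duplicate_combination n m a M out) := by
  unfold Spec_duplicate_combination; infer_instance

-- ===== CLAIM (what is proved, stated in full; the proofs are below) =====
def Claim_equal_duplicate_combination : Prop := ∀ (n : Int) (m : Int) (a : List Int) (M : Int), Dom_duplicate_combination n m a M → Pre_duplicate_combination n m a M → Spec_duplicate_combination n m a M (duplicate_combination n m a M)

-- ===== LEMMAS AND PROOFS =====

-- proof-side abbreviations for B's row computation
def pvRowInit (m : Int) : List Int := 1 :: List.replicate m.toNat 0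

def pvSum (prev : List Int) (ai j : Int) : Int :=
  (PySem.List.pyRange 0 (min j ai + 1) 1).foldl (fun s k => s + pvGetI prev (j - k)) 0

def pvF (prev : List Int) (ai M j : Int) : Int := PySem.Int.mod (pvSum prev ai j) M

def pvG (prev : List Int) (ai M j : Int) : Int := if j = 0 then 1 else pvF prev ai M j

def pvStepB (m M ai : Int) (prev : List Int) : List Int :=
  (PySem.List.pyRange 1 (m + 1) 1).foldl (fun cur j => cur ++ [pvF prev ai M j]) [1]

def pvPartial (m M ai : Int) (prev : List Int) (t : ℕ) : List Int :=
  1 :: ((PySem.List.pyRange 1 ((t : Int) + 1) 1).map (pvF prev ai M) ++ List.replicate (m.toNat - t) 0)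

def pvBrows (m M : Int) (a : List Int) : ℕ → List Int
  | 0 => pvRowInit m
  | i + 1 => pvStepB m M (pvGetI a (i : Int)) (pvBrows m M a i)

-- modular arithmetic facts about Python's % (Int.fmod)
lemma pv_mod_pm1 (x M : Int) (h : M = 1 ∨ M = -1) : PySem.Int.mod x M = 0 := by
  rcases h with h | h <;> subst h <;>
    simp [PySem.Int.mod, Int.fmod_eq_emod]

lemma pv_mod_add_cancel (x M : Int) : PySem.Int.mod (x + M) M = PySem.Int.mod x M :=
  Int.add_fmod_right x M

lemma pv_mod_mod_add (s y M : Int) :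
    PySem.Int.mod (PySem.Int.mod s M + y) M = PySem.Int.mod (s + y) M := by
  show ((s.fmod M) + y).fmod M = (s + y).fmod M
  calc ((s.fmod M) + y).fmod M = ((s.fmod M).fmod M + y.fmod M).fmod M := by
        rw [Int.add_fmod]
    _ = (s.fmod M + y.fmod M).fmod M := by rw [Int.fmod_fmod_of_dvd _ dvd_rfl]
    _ = (s + y).fmod M := (Int.add_fmod s y M).symm

lemma pvSum_eq_sum (prev : List Int) (ai j : Int) :
    pvSum prev ai j = ((PySem.List.pyRange 0 (min j ai + 1) 1).map (fun k => pvGetI prev (j - k))).sum := by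
  unfold pvSum
  rw [PySem.List.foldl_add]
  ring

lemma pv_reindex (prev : List Int) (j b : Int) (hb : 0 ≤ b) :
    ((PySem.List.pyRange 1 (b + 1) 1).map (fun k => pvGetI prev (j - k))).sum
      = ((PySem.List.pyRange 0 b 1).map (fun k => pvGetI prev (j - 1 - k))).sum := by
  rw [PySem.List.pyRange_one 1 (b + 1), PySem.List.pyRange_one 0 b]
  rw [List.map_map, List.map_map]
  have h1 : (b + 1 - 1).toNat = b.toNat := by omega
  have h2 : (b - 0).toNat = b.toNat := by omega
  rw [h1, h2]
  congr 1
  apply List.map_congr_left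
  intro k _
  simp only [Function.comp]
  congr 1
  ring

lemma pvSum_succ_big (prev : List Int) (ai j : Int) (hj : 1 ≤ j) (hja : j ≤ ai) :
    pvSum prev ai j = pvSum prev ai (j - 1) + pvGetI prev j := by
  have hmin : min j ai = j := min_eq_left hja
  have hmin' : min (j - 1) ai = j - 1 := min_eq_left (by omega)
  rw [pvSum_eq_sum, pvSum_eq_sum, hmin, hmin']
  rw [PySem.List.pyRange_one_cons (by omega : (0:Int) < j + 1)]
  simp only [List.map_cons, List.sum_cons, sub_zero, zero_add]
  rw [pv_reindex prev j j (by omega)]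
  have : j - 1 + 1 = j := by ring
  rw [this, add_comm]

lemma pvSum_succ_small (prev : List Int) (ai j : Int) (hai : 0 ≤ ai) (hja : ai ≤ j - 1) :
    pvSum prev ai j = pvSum prev ai (j - 1) + pvGetI prev j - pvGetI prev (j - 1 - ai) := by
  have hmin : min j ai = ai := min_eq_right (by omega)
  have hmin' : min (j - 1) ai = ai := min_eq_right hja
  rw [pvSum_eq_sum, pvSum_eq_sum, hmin, hmin']
  have hsplit : PySem.List.pyRange 0 (ai + 1) 1 = PySem.List.pyRange 0 ai 1 ++ [ai] :=
    PySem.List.pyRange_one_succ_right hai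
  have h2 : ((PySem.List.pyRange 0 (ai + 1) 1).map (fun k => pvGetI prev (j - 1 - k))).sum
      = ((PySem.List.pyRange 0 ai 1).map (fun k => pvGetI prev (j - 1 - k))).sum
        + pvGetI prev (j - 1 - ai) := by
    rw [hsplit, List.map_append, List.sum_append]; simp
  have h1 : ((PySem.List.pyRange 0 (ai + 1) 1).map (fun k => pvGetI prev (j - k))).sum
      = pvGetI prev j + ((PySem.List.pyRange 0 ai 1).map (fun k => pvGetI prev (j - 1 - k))).sum := by
    rw [PySem.List.pyRange_one_cons (by omega : (0:Int) < ai + 1)]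
    simp only [List.map_cons, List.sum_cons, sub_zero, zero_add]
    rw [pv_reindex prev j ai hai]
  rw [h1, h2]
  ring

lemma pvSum_zero (prev : List Int) (ai : Int) (hai : 0 ≤ ai) (hhead : pvGetI prev 0 = 1) :
    pvSum prev ai 0 = 1 := by
  have hmin : min (0:Int) ai = 0 := min_eq_left hai
  rw [pvSum_eq_sum, hmin]
  have : PySem.List.pyRange 0 (0 + 1) 1 = [0] := by
    simpa using PySem.List.pyRange_one_singleton (a := (0:Int))
  rw [this]
  simp [hhead]

lemma pvG_mod_add (prev : List Int) (ai M j' y : Int) (hai : 0 ≤ ai)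
    (hhead : pvGetI prev 0 = 1) :
    PySem.Int.mod (pvG prev ai M j' + y) M = PySem.Int.mod (pvSum prev ai j' + y) M := by
  by_cases h : j' = 0
  · subst h
    rw [pvG, if_pos rfl, pvSum_zero prev ai hai hhead]
  · rw [pvG, if_neg h, pvF, pv_mod_mod_add]

-- the telescoped sliding-window value equals the direct bounded sum
lemma pvF_rec (prev : List Int) (ai M j : Int)
    (hhead : pvGetI prev 0 = 1) (hcase : 0 ≤ ai ∨ M = 1 ∨ M = -1) (hj : 1 ≤ j) :
    (if j - 1 - ai ≥ 0 then
      PySem.Int.mod (pvG prev ai M (j - 1) + pvGetI prev j - pvGetI prev (j - 1 - ai) + M) M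
    else
      PySem.Int.mod (pvG prev ai M (j - 1) + pvGetI prev j) M)
      = pvF prev ai M j := by
  rcases hcase with hai | hM1
  · by_cases hg : j - 1 - ai ≥ 0
    · rw [if_pos hg]
      have e1 : pvG prev ai M (j - 1) + pvGetI prev j - pvGetI prev (j - 1 - ai) + M
          = pvG prev ai M (j - 1) + (pvGetI prev j - pvGetI prev (j - 1 - ai) + M) := by ring
      rw [e1, pvG_mod_add prev ai M (j - 1) _ hai hhead]
      have e2 : pvSum prev ai (j - 1) + (pvGetI prev j - pvGetI prev (j - 1 - ai) + M)
          = (pvSum prev ai (j - 1) + pvGetI prev j - pvGetI prev (j - 1 - ai)) + M := by ring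
      rw [e2, pv_mod_add_cancel, pvF,
        pvSum_succ_small prev ai j hai (by omega)]
    · rw [if_neg hg]
      rw [pvG_mod_add prev ai M (j - 1) _ hai hhead, pvF,
        pvSum_succ_big prev ai j hj (by omega)]
  · rw [pvF, pv_mod_pm1 _ _ hM1, pv_mod_pm1 _ _ hM1, pv_mod_pm1 _ _ hM1]
    split_ifs <;> rfl

lemma pvStepB_eq (m M ai : Int) (prev : List Int) :
    pvStepB m M ai prev = 1 :: (PySem.List.pyRange 1 (m + 1) 1).map (pvF prev ai M) := by
  unfold pvStepB
  rw [PySem.List.foldl_append_singleton_eq_map]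
  rfl

lemma pvPartial_zero (m M ai : Int) (prev : List Int) :
    pvPartial m M ai prev 0 = pvRowInit m := by
  unfold pvPartial pvRowInit
  simp [PySem.List.pyRange_one_eq_nil]

lemma pvPartial_last (m M ai : Int) (prev : List Int) (hm : 0 ≤ m) :
    pvPartial m M ai prev m.toNat = pvStepB m M ai prev := by
  unfold pvPartial
  rw [pvStepB_eq]
  rw [Int.toNat_of_nonneg hm]
  simp

lemma pvPartial_get (m M ai : Int) (prev : List Int) (t : ℕ) :
    pvGetI (pvPartial m M ai prev t) (t : Int) = pvG prev ai M (t : Int) := by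
  cases t with
  | zero =>
    unfold pvPartial pvG pvGetI
    simp [PySem.List.pyGetD_zero_cons]
  | succ s =>
    unfold pvPartial pvGetI
    have hcast : ((s + 1 : ℕ) : Int) = (s : Int) + 1 := by push_cast; ring
    rw [hcast]
    rw [PySem.List.pyGetD, PySem.List.pyGet?_cons_succ]
    have hlen : ((PySem.List.pyRange 1 ((s : Int) + 1 + 1) 1).map (pvF prev ai M)).length = s + 1 := by
      rw [List.length_map, PySem.List.length_pyRange_one]; omega
    rw [PySem.List.pyGet?_natCast]
    rw [List.getElem?_append_left (by omega)]
    rw [List.getElem?_map]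
    have hr : (PySem.List.pyRange 1 ((s : Int) + 1 + 1) 1)[s]? = some (1 + (s : Int)) := by
      rw [List.getElem?_eq_getElem (by rw [PySem.List.length_pyRange_one]; omega)]
      rw [PySem.List.getElem_pyRange_one]
    rw [hr]
    simp only [Option.map_some, Option.getD_some]
    rw [pvG, if_neg (by omega)]
    congr 1
    ring

lemma pvPartial_set (m M ai : Int) (prev : List Int) (t : ℕ) (ht : t + 1 ≤ m.toNat) :
    pvSetIdx (pvPartial m M ai prev t) ((t : Int) + 1) (pvF prev ai M ((t : Int) + 1))
      = pvPartial m M ai prev (t + 1) := by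
  unfold pvSetIdx
  rw [if_pos (by omega)]
  have htn : ((t : Int) + 1).toNat = t + 1 := by omega
  rw [htn]
  unfold pvPartial
  rw [List.set_cons_succ]
  have hlen : ((PySem.List.pyRange 1 ((t : Int) + 1) 1).map (pvF prev ai M)).length = t := by
    rw [List.length_map, PySem.List.length_pyRange_one]; omega
  rw [List.set_append]
  rw [if_neg (by omega)]
  rw [hlen]
  have hrep : List.replicate (m.toNat - t) (0 : Int) = 0 :: List.replicate (m.toNat - (t + 1)) 0 := by
    rw [← List.replicate_succ]
    congr 1
    omega
  rw [hrep]
  simp only [Nat.sub_self, List.set_cons_zero]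
  have hcast : ((t + 1 : ℕ) : Int) = (t : Int) + 1 := by push_cast; ring
  rw [hcast]
  rw [PySem.List.pyRange_one_succ_right (by omega : (1:Int) ≤ (t : Int) + 1)]
  rw [List.map_append]
  simp

lemma pvBrows_head (m M : Int) (a : List Int) (i : ℕ) :
    pvGetI (pvBrows m M a i) 0 = 1 := by
  cases i with
  | zero => unfold pvBrows pvRowInit pvGetI; simp [PySem.List.pyGetD_zero_cons]
  | succ s =>
    show pvGetI (pvStepB m M (pvGetI a (s : Int)) (pvBrows m M a s)) 0 = 1
    rw [pvStepB_eq]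
    unfold pvGetI
    simp [PySem.List.pyGetD_zero_cons]

-- reading / writing the middle of the dp list
lemma pv_getRow_at (pre : List (List Int)) (x : List Int) (suf : List (List Int)) :
    pvGetRow (pre ++ x :: suf) (pre.length : Int) = x := by
  unfold pvGetRow
  rw [PySem.List.pyGetD, PySem.List.pyGet?_append_length]
  rfl

lemma pv_setRow_at (pre : List (List Int)) (x z : List Int) (suf : List (List Int)) :
    pvSetIdx (pre ++ x :: suf) (pre.length : Int) z = pre ++ z :: suf := by
  unfold pvSetIdx
  rw [if_pos (by omega)]
  have h : ((pre.length : Int)).toNat = pre.length := by omega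
  rw [h, List.set_append, if_neg (by omega)]
  simp

lemma pv_getRow_at1 (pre : List (List Int)) (x y : List Int) (suf : List (List Int)) :
    pvGetRow (pre ++ x :: y :: suf) ((pre.length : Int) + 1) = y := by
  have hre : pre ++ x :: y :: suf = (pre ++ [x]) ++ y :: suf := by simp
  have hl : (pre.length : Int) + 1 = (((pre ++ [x]).length : ℕ) : Int) := by
    simp
  rw [hre, hl, pv_getRow_at]

lemma pv_setRow_at1 (pre : List (List Int)) (x y z : List Int) (suf : List (List Int)) :
    pvSetIdx (pre ++ x :: y :: suf) ((pre.length : Int) + 1) z = pre ++ x :: z :: suf := by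
  have hre : pre ++ x :: y :: suf = (pre ++ [x]) ++ y :: suf := by simp
  have hl : (pre.length : Int) + 1 = (((pre ++ [x]).length : ℕ) : Int) := by
    simp
  rw [hre, hl, pv_setRow_at]
  simp

-- the inner j-loop of A rebuilds exactly B's next row
lemma pv_inner (m M ai : Int) (hm : 0 ≤ m)
    (hcase : 0 ≤ ai ∨ M = 1 ∨ M = -1)
    (prev : List Int) (hhead : pvGetI prev 0 = 1)
    (pre suf : List (List Int)) :
    (PySem.List.pyRange 1 (m + 1) 1).foldl
      (fun dp j =>
        pvSetIdx dp ((pre.length : Int) + 1) (pvSetIdx (pvGetRow dp ((pre.length : Int) + 1)) j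
          (if j - 1 - ai ≥ 0 then
            PySem.Int.mod (pvGetI (pvGetRow dp ((pre.length : Int) + 1)) (j - 1)
              + pvGetI (pvGetRow dp (pre.length : Int)) j
              - pvGetI (pvGetRow dp (pre.length : Int)) (j - 1 - ai) + M) M
          else
            PySem.Int.mod (pvGetI (pvGetRow dp ((pre.length : Int) + 1)) (j - 1)
              + pvGetI (pvGetRow dp (pre.length : Int)) j) M)))
      (pre ++ prev :: pvRowInit m :: suf)
    = pre ++ prev :: pvStepB m M ai prev :: suf := by
  have main : ∀ t : ℕ, t ≤ m.toNat →
      (PySem.List.pyRange 1 ((t : Int) + 1) 1).foldl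
        (fun dp j =>
          pvSetIdx dp ((pre.length : Int) + 1) (pvSetIdx (pvGetRow dp ((pre.length : Int) + 1)) j
            (if j - 1 - ai ≥ 0 then
              PySem.Int.mod (pvGetI (pvGetRow dp ((pre.length : Int) + 1)) (j - 1)
                + pvGetI (pvGetRow dp (pre.length : Int)) j
                - pvGetI (pvGetRow dp (pre.length : Int)) (j - 1 - ai) + M) M
            else
              PySem.Int.mod (pvGetI (pvGetRow dp ((pre.length : Int) + 1)) (j - 1)
                + pvGetI (pvGetRow dp (pre.length : Int)) j) M)))
        (pre ++ prev :: pvRowInit m :: suf)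
      = pre ++ prev :: pvPartial m M ai prev t :: suf := by
    intro t
    induction t with
    | zero =>
      intro _
      rw [pvPartial_zero]
      norm_num [PySem.List.pyRange_one_eq_nil]
    | succ s ih =>
      intro hs
      have hcast : ((s + 1 : ℕ) : Int) = (s : Int) + 1 := by push_cast; ring
      rw [hcast]
      rw [PySem.List.pyRange_one_succ_right (by omega : (1:Int) ≤ (s : Int) + 1)]
      rw [List.foldl_append]
      rw [ih (by omega)]
      simp only [List.foldl_cons, List.foldl_nil]
      rw [pv_getRow_at, pv_getRow_at1]
      have hsimp : (s : Int) + 1 - 1 = (s : Int) := by ring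
      rw [hsimp, pvPartial_get]
      have hv := pvF_rec prev ai M ((s : Int) + 1) hhead hcase (by omega)
      rw [hsimp] at hv
      rw [hv]
      rw [pvPartial_set m M ai prev s hs]
      rw [pv_setRow_at1]
  have hfin := main m.toNat le_rfl
  rw [Int.toNat_of_nonneg hm] at hfin
  rw [hfin, pvPartial_last m M ai prev hm]

-- phase 1: building the zero table
lemma pv_phase1 (n m : Int) :
    ((PySem.List.pyRange 0 (n + 1) 1).foldl (fun dp _i =>
      dp ++ [(PySem.List.pyRange 0 (m + 1) 1).foldl (fun row _j => row ++ [(0 : Int)]) []]) [])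
    = List.replicate (n + 1).toNat (List.replicate (m + 1).toNat (0 : Int)) := by
  have hrow : (PySem.List.pyRange 0 (m + 1) 1).foldl (fun row _j => row ++ [(0 : Int)]) []
      = List.replicate (m + 1).toNat (0 : Int) := by
    rw [PySem.List.foldl_append_singleton_eq_map (f := fun _ => (0 : Int))]
    simp [List.map_const', PySem.List.length_pyRange_one]
  rw [hrow]
  rw [PySem.List.foldl_append_singleton_eq_map (f := fun _ => List.replicate (m + 1).toNat (0 : Int))]
  simp [List.map_const', PySem.List.length_pyRange_one]

-- phase 2: writing the 1 column
lemma pv_setcol (z z' : List Int) (hz : z' = pvSetIdx z 0 1) :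
    ∀ (t : ℕ) (rest : List (List Int)),
    (PySem.List.pyRange 0 (t : Int) 1).foldl (fun dp i =>
        pvSetIdx dp i (pvSetIdx (pvGetRow dp i) 0 1)) (List.replicate t z ++ rest)
      = List.replicate t z' ++ rest := by
  intro t
  induction t with
  | zero => intro rest; simp [PySem.List.pyRange_one_eq_nil]
  | succ s ih =>
    intro rest
    have hcast : ((s + 1 : ℕ) : Int) = (s : Int) + 1 := by push_cast; ring
    rw [hcast]
    rw [PySem.List.pyRange_one_succ_right (by omega : (0:Int) ≤ (s : Int))]
    rw [List.foldl_append]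
    have hsplit : List.replicate (s + 1) z ++ rest = List.replicate s z ++ (z :: rest) := by
      rw [List.replicate_succ']; simp
    rw [hsplit, ih]
    simp only [List.foldl_cons, List.foldl_nil]
    have hs : (s : Int) = (((List.replicate s z' : List (List Int)).length : ℕ) : Int) := by simp
    rw [hs, pv_getRow_at, pv_setRow_at, ← hz]
    rw [List.replicate_succ']
    simp

-- combined phases 1+2: the initial table
lemma pv_dp2 (n m : Int) (hn : 0 ≤ n) (hm : 0 ≤ m) :
    ((PySem.List.pyRange 0 (n + 1) 1).foldl (fun dp i =>
      pvSetIdx dp i (pvSetIdx (pvGetRow dp i) 0 1))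
      ((PySem.List.pyRange 0 (n + 1) 1).foldl (fun dp _i =>
        dp ++ [(PySem.List.pyRange 0 (m + 1) 1).foldl (fun row _j => row ++ [(0 : Int)]) []]) []))
    = List.replicate (n.toNat + 1) (pvRowInit m) := by
  rw [pv_phase1]
  have hz : pvRowInit m = pvSetIdx (List.replicate (m + 1).toNat (0 : Int)) 0 1 := by
    unfold pvSetIdx pvRowInit
    rw [if_pos le_rfl]
    have : (m + 1).toNat = m.toNat + 1 := by omega
    rw [this, List.replicate_succ, Int.toNat_zero, List.set_cons_zero]
  have hr : (((n + 1).toNat : ℕ) : Int) = n + 1 := by omega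
  have h := pv_setcol (List.replicate (m + 1).toNat (0 : Int)) (pvRowInit m) hz (n + 1).toNat []
  simp only [List.append_nil] at h
  rw [hr] at h
  rw [h]
  have : (n + 1).toNat = n.toNat + 1 := by omega
  rw [this]

-- phase 3: the outer i-loop
lemma pv_outer (n m M : Int) (a : List Int) (hn : 0 ≤ n) (hm : 0 ≤ m)
    (hc : ∀ i : Int, 0 ≤ i → i < n → (0 ≤ pvGetI a i ∨ M = 1 ∨ M = -1)) :
    ∀ t : ℕ, (t : Int) ≤ n →
    (PySem.List.pyRange 0 (t : Int) 1).foldl (fun dp i =>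
      (PySem.List.pyRange 1 (m + 1) 1).foldl (fun dp j =>
        pvSetIdx dp (i + 1) (pvSetIdx (pvGetRow dp (i + 1)) j
          (if j - 1 - pvGetI a i ≥ 0 then
            PySem.Int.mod (pvGetI (pvGetRow dp (i + 1)) (j - 1) + pvGetI (pvGetRow dp i) j
              - pvGetI (pvGetRow dp i) (j - 1 - pvGetI a i) + M) M
          else
            PySem.Int.mod (pvGetI (pvGetRow dp (i + 1)) (j - 1) + pvGetI (pvGetRow dp i) j) M))) dp)
      (List.replicate (n.toNat + 1) (pvRowInit m))
    = List.map (pvBrows m M a) (List.range (t + 1)) ++ List.replicate (n.toNat - t) (pvRowInit m) := by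
  intro t
  induction t with
  | zero =>
    intro _
    simp [PySem.List.pyRange_one_eq_nil, List.replicate_succ, pvBrows]
  | succ s ih =>
    intro hs
    have hs' : ((s + 1 : ℕ) : Int) = (s : Int) + 1 := by push_cast; ring
    rw [hs'] at hs ⊢
    rw [PySem.List.pyRange_one_succ_right (by omega : (0:Int) ≤ (s : Int))]
    rw [List.foldl_append]
    rw [ih (by omega)]
    simp only [List.foldl_cons, List.foldl_nil]
    have hlt : s < n.toNat := by omega
    have hD : List.map (pvBrows m M a) (List.range (s + 1)) ++ List.replicate (n.toNat - s) (pvRowInit m)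
        = List.map (pvBrows m M a) (List.range s)
            ++ pvBrows m M a s :: pvRowInit m :: List.replicate (n.toNat - s - 1) (pvRowInit m) := by
      rw [List.range_succ, List.map_append]
      have : n.toNat - s = (n.toNat - s - 1) + 1 := by omega
      rw [this, List.replicate_succ]
      simp
    rw [hD]
    have hcs := hc (s : Int) (by omega) (by omega)
    have hinner := pv_inner m M (pvGetI a (s : Int)) hm hcs (pvBrows m M a s)
      (pvBrows_head m M a s) (List.map (pvBrows m M a) (List.range s))
      (List.replicate (n.toNat - s - 1) (pvRowInit m))
    have hp : ((List.map (pvBrows m M a) (List.range s)).length : Int) = (s : Int) := by simp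
    rw [hp] at hinner
    rw [hinner]
    rw [List.range_succ (n := s + 1), List.map_append, List.range_succ, List.map_append]
    have hsuf : n.toNat - (s + 1) = n.toNat - s - 1 := by omega
    rw [hsuf]
    simp [pvBrows]

-- A's port computes the iterated B row
lemma pv_A_eq (n m M : Int) (a : List Int) (hn : 0 ≤ n) (hm : 0 ≤ m)
    (hc : ∀ i : Int, 0 ≤ i → i < n → (0 ≤ pvGetI a i ∨ M = 1 ∨ M = -1)) :
    duplicate_combination n m a M = pvGetI (pvBrows m M a n.toNat) m := by
  simp only [duplicate_combination]
  rw [pv_dp2 n m hn hm]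
  have hn' : ((n.toNat : ℕ) : Int) = n := Int.toNat_of_nonneg hn
  have h := pv_outer n m M a hn hm hc n.toNat (by omega)
  rw [hn'] at h
  rw [h]
  simp only [Nat.sub_self, List.replicate_zero, List.append_nil]
  unfold pvGetRow
  rw [PySem.List.pyGetD_eq_getElem _ _ hn (by simp)]
  rw [List.getElem_map, List.getElem_range]

-- B's port computes the iterated B row
lemma pv_B_eq (n m M : Int) (a : List Int) (hn : 0 ≤ n) :
    duplicate_combination_alt n m a M = pvGetI (pvBrows m M a n.toNat) m := by
  simp only [duplicate_combination_alt]
  have main : ∀ t : ℕ,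
      (PySem.List.pyRange 0 (t : Int) 1).foldl (fun prev i =>
        (PySem.List.pyRange 1 (m + 1) 1).foldl (fun cur j =>
          cur ++ [PySem.Int.mod
            ((PySem.List.pyRange 0 (min j (pvGetI a i) + 1) 1).foldl
              (fun s k => s + pvGetI prev (j - k)) 0) M]) [1])
        ([1] ++ List.replicate m.toNat 0)
      = pvBrows m M a t := by
    intro t
    induction t with
    | zero => simp [PySem.List.pyRange_one_eq_nil, pvBrows, pvRowInit]
    | succ s ih =>
      have hs' : ((s + 1 : ℕ) : Int) = (s : Int) + 1 := by push_cast; ring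
      rw [hs']
      rw [PySem.List.pyRange_one_succ_right (by omega : (0:Int) ≤ (s : Int))]
      rw [List.foldl_append]
      rw [ih]
      simp only [List.foldl_cons, List.foldl_nil]
      rfl
  have hn' : ((n.toNat : ℕ) : Int) = n := Int.toNat_of_nonneg hn
  have h := main n.toNat
  rw [hn'] at h
  rw [h]

-- the degenerate m = 0 case: both programs return 1
lemma pv_A_m0 (n M : Int) (a : List Int) (hn : 0 ≤ n) :
    duplicate_combination n 0 a M = 1 := by
  simp only [duplicate_combination]
  rw [pv_dp2 n 0 hn le_rfl]
  have hinner : PySem.List.pyRange 1 (0 + 1) 1 = [] := by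
    norm_num [PySem.List.pyRange_one_eq_nil]
  rw [hinner]
  simp only [List.foldl_nil]
  rw [PySem.List.foldl_ignore]
  unfold pvGetRow
  rw [PySem.List.pyGetD_eq_getElem _ _ hn (by simp)]
  rw [List.getElem_replicate]
  unfold pvRowInit pvGetI
  simp [PySem.List.pyGetD_zero_cons]

lemma pv_foldl_const {α β : Type} (c : α) : ∀ (l : List β), l.foldl (fun _ _ => c) c = c := by
  intro l
  induction l with
  | nil => rfl
  | cons x xs ih => simpa using ih

lemma pv_B_m0 (n M : Int) (a : List Int) :
    duplicate_combination_alt n 0 a M = 1 := by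
  simp only [duplicate_combination_alt]
  have hinner : PySem.List.pyRange 1 (0 + 1) 1 = [] := by
    norm_num [PySem.List.pyRange_one_eq_nil]
  rw [hinner]
  simp only [List.foldl_nil, Int.toNat_zero, List.replicate_zero, List.append_nil]
  rw [pv_foldl_const]
  unfold pvGetI
  simp [PySem.List.pyGetD_zero_cons]

-- ===== VERDICT (by name: the statement is the Claim_ definition above) =====
theorem duplicate_combination_spec : Claim_equal_duplicate_combination := by
  intro n m a M _hdom hpre
  unfold Spec_duplicate_combination
  obtain ⟨hn, hnl, hm, hMz, hneg⟩ := hpre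
  by_cases hm0 : m = 0
  · subst hm0
    rw [pv_A_m0 n M a hn, pv_B_m0 n M a]
  · have htake : ∀ x ∈ a.take n.toNat, 0 ≤ x := by
      rcases hneg with h | h
      · exact absurd h hm0
      · exact h
    have hc : ∀ i : Int, 0 ≤ i → i < n → (0 ≤ pvGetI a i ∨ M = 1 ∨ M = -1) := by
      intro i h0 hiN
      left
      have hilt : i.toNat < a.length := by omega
      have hg : pvGetI a i = a[i.toNat] :=
        PySem.List.pyGetD_eq_getElem a 0 h0 (by omega)
      have hlt2 : i.toNat < n.toNat := by omega
      have hmem : a[i.toNat] ∈ a.take n.toNat := by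
        have hgt : (a.take n.toNat)[i.toNat]'(by simp [hilt, hlt2]) = a[i.toNat] :=
          List.getElem_take
        rw [← hgt]
        exact List.getElem_mem _
      rw [hg]
      exact htake _ hmem
    rw [pv_A_eq n m M a hn (by omega) hc, pv_B_eq n m M a hn]
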